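-- pv_equiv track=rewrite | github.com/JeongaHan/pythonprogramming | programmers/mock_test.py | solution
-- ===== SOURCE A (Python) =====
-- def solution(answers):
--     score = [0, 0, 0]
--     answer = []
--     student = [[1, 2, 3, 4, 5], [2, 1, 2, 3, 2, 4, 2, 5], [3, 3, 1, 1, 2, 2, 4, 4, 5, 5]]
--     for i in range(len(answers)):
--         if student[0][i % len(student[0])] == answers[i]:
--             score[0] += 1
--         if student[1][i % len(student[1])] == answers[i]:
--             score[1] += 1
--         if student[2][i % len(student[2])] == answers[i]:
--             score[2] += 1
--
--     if score[0] == score[1] & score[1] == score[2]: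
--         return [1, 2, 3]
--     tempmax = max(score)
--     if score[0] == tempmax:
--         answer.append(1)
--     if score[1] == tempmax:
--         answer.append(2)
--     if score[2] == tempmax:
--         answer.append(3)
--     return answer
-- ===== SOURCE B (Python) =====
-- def solution(answers):
--     patterns = [[1, 2, 3, 4, 5],
--                 [2, 1, 2, 3, 2, 4, 2, 5],
--                 [3, 3, 1, 1, 2, 2, 4, 4, 5, 5]]
--     # One pass: tally the answers by (position mod 40, value); 40 = lcm of the
--     # three pattern lengths, so a position's residue mod 40 determines what every
--     # student guesses there.
--     freq = {}
--     for i, a in enumerate(answers):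
--         key = (i % 40, a)
--         freq[key] = freq.get(key, 0) + 1
--     # Each student's score is then a fixed 40-term sum of table lookups.
--     scores = [sum(freq.get((r, pat[r % len(pat)]), 0) for r in range(40))
--               for pat in patterns]
--     m = max(scores)
--     return [k + 1 for k, s in enumerate(scores) if s == m]
-- ===== Notes on version B (the rewrite author's own statement) =====
-- stated objective: alternative
-- what changed: B never compares an answer against a pattern while scanning: one pass builds a frequency table keyed by (index mod 40, answer) (40 = lcm of the pattern lengths), each score is then a fixed 40-term table-lookup sum, and a single max-collection replaces A's redundant all-equal early return and append chain.
import Mathlib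
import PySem

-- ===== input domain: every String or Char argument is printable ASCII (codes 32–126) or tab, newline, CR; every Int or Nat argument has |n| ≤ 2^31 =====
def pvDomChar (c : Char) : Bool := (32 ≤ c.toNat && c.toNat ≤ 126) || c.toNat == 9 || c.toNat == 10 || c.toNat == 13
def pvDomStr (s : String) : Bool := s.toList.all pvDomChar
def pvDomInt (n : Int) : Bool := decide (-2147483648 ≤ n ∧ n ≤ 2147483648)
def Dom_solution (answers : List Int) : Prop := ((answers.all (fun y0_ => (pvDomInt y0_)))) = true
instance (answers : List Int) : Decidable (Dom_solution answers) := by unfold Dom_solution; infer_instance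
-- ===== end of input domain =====

-- B is an alternative algorithm: one pass tallies answers into a frequency table keyed by
-- (index mod 40, answer) (40 = lcm of the pattern lengths); each score is a fixed 40-term
-- table-lookup sum, and a max-collection replaces A's early return and append chain.

-- ===== PORT A =====
def solution (answers : List Int) : List Int :=
  let student0 : List Int := [1, 2, 3, 4, 5]
  let student1 : List Int := [2, 1, 2, 3, 2, 4, 2, 5]
  let student2 : List Int := [3, 3, 1, 1, 2, 2, 4, 4, 5, 5]
  let score : Int × Int × Int :=
    (PySem.List.pyRange 0 (answers.length : Int) 1).foldl
      (fun (s : Int × Int × Int) i =>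
        ((if PySem.List.pyGetD student0 (PySem.Int.mod i (student0.length : Int)) 0
              = PySem.List.pyGetD answers i 0 then s.1 + 1 else s.1),
         (if PySem.List.pyGetD student1 (PySem.Int.mod i (student1.length : Int)) 0
              = PySem.List.pyGetD answers i 0 then s.2.1 + 1 else s.2.1),
         (if PySem.List.pyGetD student2 (PySem.Int.mod i (student2.length : Int)) 0
              = PySem.List.pyGetD answers i 0 then s.2.2 + 1 else s.2.2)))
      (0, 0, 0)
  -- Python's 'score[0] == score[1] & score[1] == score[2]' parses as the chained
  -- comparison score[0] == (score[1] & score[1]) == score[2]; ported with PySem.Int.band.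
  if score.1 = PySem.Int.band score.2.1 score.2.1 ∧ PySem.Int.band score.2.1 score.2.1 = score.2.2 then
    [1, 2, 3]
  else
    let tempmax : Int :=
      (PySem.List.max? [score.1, score.2.1, score.2.2] (fun x => x)).getD 0
    let answer : List Int := []
    let answer := if score.1 = tempmax then answer ++ [1] else answer
    let answer := if score.2.1 = tempmax then answer ++ [2] else answer
    let answer := if score.2.2 = tempmax then answer ++ [3] else answer
    answer

-- ===== PORT B =====
def solution_alt (answers : List Int) : List Int :=
  let patterns : List (List Int) :=
    [[1, 2, 3, 4, 5], [2, 1, 2, 3, 2, 4, 2, 5], [3, 3, 1, 1, 2, 2, 4, 4, 5, 5]]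
  -- freq[(i % 40, a)] += 1, one pass over enumerate(answers)
  let freq : PySem.Dict (Int × Int) Int :=
    (PySem.List.enumerate answers 0).foldl
      (fun d p =>
        d.insert (PySem.Int.mod p.1 40, p.2) (d.getD (PySem.Int.mod p.1 40, p.2) 0 + 1))
      PySem.Dict.empty
  -- each score is a 40-term sum of table lookups
  let scores : List Int := patterns.map (fun pat =>
    (PySem.List.pyRange 0 40 1).foldl
      (fun acc r =>
        acc + freq.getD (r, PySem.List.pyGetD pat (PySem.Int.mod r (pat.length : Int)) 0) 0)
      0)
  let m : Int := (PySem.List.max? scores (fun x => x)).getD 0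
  (PySem.List.enumerate scores 0).foldl
    (fun (acc : List Int) p => if p.2 = m then acc ++ [p.1 + 1] else acc) []

-- ===== PRECONDITION & SPEC =====
def Spec_solution (answers : List Int) (out : List Int) : Prop := out = solution_alt answers
instance (answers : List Int) (out : List Int) : Decidable (Spec_solution answers out) := by unfold Spec_solution; infer_instance

-- ===== CLAIM (what is proved, stated in full; the proofs are below) =====
def Claim_equal_solution : Prop := ∀ (answers : List Int), Dom_solution answers → Spec_solution answers (solution answers)

-- ===== LEMMAS AND PROOFS =====

-- a one-hot sum: (m, x) matches at most the r = m entry of the table row list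
theorem onehot_zero (v : Int → Int) (m x : Int) (R : List Int) (hm : m ∉ R) :
    (R.map (fun r => if ((m, x) : Int × Int) = (r, v r) then (1 : Int) else 0)).sum = 0 := by
  induction R with
  | nil => simp
  | cons r R ih =>
    rw [List.map_cons, List.sum_cons, if_neg, ih (fun h => hm (List.mem_cons_of_mem _ h)),
      add_zero]
    intro h
    rw [Prod.mk.injEq] at h
    exact hm (h.1 ▸ List.mem_cons_self)

theorem onehot (v : Int → Int) (m x : Int) (R : List Int) (hR : R.Nodup) (hm : m ∈ R) :
    (R.map (fun r => if ((m, x) : Int × Int) = (r, v r) then (1 : Int) else 0)).sum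
      = if x = v m then 1 else 0 := by
  induction R with
  | nil => cases hm
  | cons r R ih =>
    rw [List.map_cons, List.sum_cons]
    rcases List.mem_cons.mp hm with h | h
    · subst h
      rw [onehot_zero v m x R (List.nodup_cons.mp hR).1, add_zero]
      simp [Prod.mk.injEq]
    · rw [if_neg, ih (List.nodup_cons.mp hR).2 h, zero_add]
      intro he
      rw [Prod.mk.injEq] at he
      exact (List.nodup_cons.mp hR).1 (he.1 ▸ h)

-- summing the counter over the 40 table cells of a row recovers the direct match count
theorem sum_count (v : Int → Int) (l : List (Int × Int)) :
    ((PySem.List.pyRange 0 40 1).map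
        (fun r => ((l.map (fun p => (PySem.Int.mod p.1 40, p.2))).count (r, v r) : Int))).sum
      = (l.countP (fun p => p.2 = v (PySem.Int.mod p.1 40)) : Int) := by
  induction l with
  | nil => simp
  | cons p l ih =>
    simp only [List.map_cons, List.count_cons, List.countP_cons]
    have hsplit :
        ((PySem.List.pyRange 0 40 1).map
            (fun r => ((l.map (fun p => (PySem.Int.mod p.1 40, p.2))).count (r, v r) : Int)
              + if ((PySem.Int.mod p.1 40, p.2) : Int × Int) = (r, v r) then 1 else 0)).sum
          = ((PySem.List.pyRange 0 40 1).map
              (fun r => ((l.map (fun p => (PySem.Int.mod p.1 40, p.2))).count (r, v r) : Int))).sum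
            + ((PySem.List.pyRange 0 40 1).map
              (fun r => if ((PySem.Int.mod p.1 40, p.2) : Int × Int) = (r, v r) then (1:Int) else 0)).sum :=
      PySem.List.sum_map_add_int _ _ _
    have hmem : PySem.Int.mod p.1 40 ∈ PySem.List.pyRange 0 40 1 :=
      PySem.List.mem_pyRange_one.mpr
        ⟨PySem.Int.mod_nonneg _ (by norm_num), PySem.Int.mod_lt _ (by norm_num)⟩
    have hnodup : (PySem.List.pyRange 0 40 1).Nodup := by decide
    simp only [beq_iff_eq, decide_eq_true_eq]
    push_cast
    rw [hsplit, ih, onehot v (PySem.Int.mod p.1 40) p.2 _ hnodup hmem]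

-- i % len(pat) only depends on i % 40 when len(pat) divides 40
theorem mod40_reduce (pat : List Int) (hd : pat.length ∣ 40) (j : Int) (hj : 0 ≤ j) :
    PySem.Int.mod (PySem.Int.mod j 40) (pat.length : Int) = PySem.Int.mod j (pat.length : Int) := by
  obtain ⟨n, rfl⟩ := Int.eq_ofNat_of_zero_le hj
  rw [show (40 : Int) = ((40 : Nat) : Int) from rfl, PySem.Int.mod_natCast,
    PySem.Int.mod_natCast, PySem.Int.mod_natCast, Nat.mod_mod_of_dvd n hd]

-- B's table pass for one pattern equals A's direct counting pass for that pattern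
theorem score_eq (answers pat : List Int) (hd : pat.length ∣ 40) :
    (PySem.List.pyRange 0 40 1).foldl
      (fun acc r =>
        acc + ((PySem.List.enumerate answers 0).foldl
          (fun (d : PySem.Dict (Int × Int) Int) p =>
            d.insert (PySem.Int.mod p.1 40, p.2) (d.getD (PySem.Int.mod p.1 40, p.2) 0 + 1))
          PySem.Dict.empty).getD
            (r, PySem.List.pyGetD pat (PySem.Int.mod r (pat.length : Int)) 0) 0)
      0
    = (PySem.List.pyRange 0 (answers.length : Int) 1).foldl
        (fun acc i =>
          if PySem.List.pyGetD pat (PySem.Int.mod i (pat.length : Int)) 0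
              = PySem.List.pyGetD answers i 0 then acc + 1 else acc)
        0 := by
  have hfreq :
      (PySem.List.enumerate answers 0).foldl
        (fun (d : PySem.Dict (Int × Int) Int) p =>
          d.insert (PySem.Int.mod p.1 40, p.2) (d.getD (PySem.Int.mod p.1 40, p.2) 0 + 1))
        PySem.Dict.empty
      = PySem.Dict.counter
          ((PySem.List.enumerate answers 0).map (fun p => (PySem.Int.mod p.1 40, p.2))) := by
    rw [← PySem.Dict.foldl_insert_getD_add_one_eq_counter, List.foldl_map]
  rw [hfreq, PySem.List.foldl_add, zero_add]
  simp only [PySem.Dict.getD_counter]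
  rw [sum_count (fun r => PySem.List.pyGetD pat (PySem.Int.mod r (pat.length : Int)) 0)
    (PySem.List.enumerate answers 0)]
  have hfold :
      (PySem.List.pyRange 0 (answers.length : Int) 1).foldl
        (fun acc i =>
          if PySem.List.pyGetD pat (PySem.Int.mod i (pat.length : Int)) 0
              = PySem.List.pyGetD answers i 0 then acc + 1 else acc)
        0
      = ((PySem.List.pyRange 0 (answers.length : Int) 1).countP (fun i =>
          decide (PySem.List.pyGetD pat (PySem.Int.mod i (pat.length : Int)) 0
            = PySem.List.pyGetD answers i 0)) : Int) := by
    rw [show (fun (acc : Int) i =>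
          if PySem.List.pyGetD pat (PySem.Int.mod i (pat.length : Int)) 0
              = PySem.List.pyGetD answers i 0 then acc + 1 else acc)
        = (fun (acc : Int) i =>
          if (fun i => decide (PySem.List.pyGetD pat (PySem.Int.mod i (pat.length : Int)) 0
              = PySem.List.pyGetD answers i 0)) i = true then acc + 1 else acc) from
      funext fun acc => funext fun i => by simp]
    rw [PySem.List.foldl_count_if, zero_add]
  rw [hfold, PySem.List.enumerate_eq_map_pyRange (d := 0), List.countP_map,
    PySem.List.len_eq]
  congr 1
  apply List.countP_congr
  intro j hj
  have hj0 : 0 ≤ j := (PySem.List.mem_pyRange_one.mp hj).1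
  simp only [Function.comp, decide_eq_true_eq, mod40_reduce pat hd j hj0]
  exact ⟨fun h => h.symm, fun h => h.symm⟩

-- the post-score stage: A's all-equal early return + append chain equals B's max-collection
theorem tail_eq (a b c : Int) :
    (if a = PySem.Int.band b b ∧ PySem.Int.band b b = c then ([1, 2, 3] : List Int)
     else
       let tempmax : Int := (PySem.List.max? [a, b, c] (fun x => x)).getD 0
       let answer : List Int := []
       let answer := if a = tempmax then answer ++ [1] else answer
       let answer := if b = tempmax then answer ++ [2] else answer
       let answer := if c = tempmax then answer ++ [3] else answer
       answer)
    = (let m : Int := (PySem.List.max? [a, b, c] (fun x => x)).getD 0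
       (PySem.List.enumerate [a, b, c] 0).foldl
         (fun (acc : List Int) p => if p.2 = m then acc ++ [p.1 + 1] else acc) []) := by
  simp only [PySem.Int.band_self, PySem.List.max?_id_cons, Option.getD_some,
    PySem.List.enumerate_cons, PySem.List.enumerate_nil, List.foldl_cons, List.foldl_nil]
  by_cases h : a = b ∧ b = c
  · obtain ⟨h1, h2⟩ := h
    subst h1; subst h2
    norm_num
  · rw [if_neg h]
    norm_num

-- ===== VERDICT (by name: the statement is the Claim_ definition above) =====
theorem solution_spec : Claim_equal_solution := by
  intro answers _
  unfold Spec_solution solution solution_alt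
  simp only [List.length_cons, List.length_nil]
  norm_num only
  rw [PySem.List.foldl_prod_mk
    (f := fun (acc : Int) i =>
        if PySem.List.pyGetD ([1,2,3,4,5] : List Int) (PySem.Int.mod i 5) 0
            = PySem.List.pyGetD answers i 0 then acc + 1 else acc)
    (g := fun (s : Int × Int) i =>
        ((if PySem.List.pyGetD ([2,1,2,3,2,4,2,5] : List Int) (PySem.Int.mod i 8) 0
              = PySem.List.pyGetD answers i 0 then s.1 + 1 else s.1),
         (if PySem.List.pyGetD ([3,3,1,1,2,2,4,4,5,5] : List Int) (PySem.Int.mod i 10) 0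
              = PySem.List.pyGetD answers i 0 then s.2 + 1 else s.2)))]
  rw [PySem.List.foldl_prod_mk
    (f := fun (acc : Int) i =>
        if PySem.List.pyGetD ([2,1,2,3,2,4,2,5] : List Int) (PySem.Int.mod i 8) 0
            = PySem.List.pyGetD answers i 0 then acc + 1 else acc)
    (g := fun (acc : Int) i =>
        if PySem.List.pyGetD ([3,3,1,1,2,2,4,4,5,5] : List Int) (PySem.Int.mod i 10) 0
            = PySem.List.pyGetD answers i 0 then acc + 1 else acc)]
  have h0 := score_eq answers ([1,2,3,4,5] : List Int) (by decide)
  have h1 := score_eq answers ([2,1,2,3,2,4,2,5] : List Int) (by decide)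
  have h2 := score_eq answers ([3,3,1,1,2,2,4,4,5,5] : List Int) (by decide)
  norm_num only at h0 h1 h2
  simp only [List.map_cons, List.map_nil, h0, h1, h2]
  exact tail_eq _ _ _
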